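-- pv_equiv track=rewrite | github.com/backspacevenkat/polydev-swe-bench | agent/patch_generator.py | _extract_inline_diff
-- ===== SOURCE A (Python) =====
-- from typing import Optional, List
--
-- def _extract_inline_diff(response: str) -> Optional[str]:
--     """Extract diff from inline content."""
--     lines = response.split("\n")
--     diff_lines = []
--     in_diff = False
--
--     for line in lines:
--         if line.startswith("diff --git") or line.startswith("---"):
--             in_diff = True
--
--         if in_diff:
--             # Stop at clear non-diff content
--             if (line and not line[0] in " +-@" and
--                 not line.startswith("diff") and
--                 not line.startswith("---") and
--                 not line.startswith("+++") and
--                 not line.startswith("index")):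
--                 break
--
--             diff_lines.append(line)
--
--     return "\n".join(diff_lines) if diff_lines else None
-- ===== SOURCE B (Python) =====
-- from typing import Optional
--
--
-- def _extract_inline_diff(response: str) -> Optional[str]:
--     """Extract diff from inline content by scanning raw character offsets.
--
--     Never splits the text into a list of lines: walks newline positions with
--     str.find, checks line heads in place with offset startswith, and returns
--     one contiguous substring of the input.
--     """
--     # phase 1: offset p of the first line that opens a diff, walking newline to newline
--     p = 0
--     while not (response.startswith("diff --git", p) or response.startswith("---", p)):
--         nl = response.find("\n", p)
--         if nl == -1:
--             return None
--         p = nl + 1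
--     # phase 2: offset of the first clearly-non-diff line after p, or None if the
--     # diff runs to the end of the text
--     q = p
--     stop = None
--     while True:
--         if (q < len(response) and response[q] not in " +-@\n"
--                 and not response.startswith(("diff", "---", "+++", "index"), q)):
--             stop = q
--             break
--         nl = response.find("\n", q)
--         if nl == -1:
--             break
--         q = nl + 1
--     # drop the newline that precedes the stop line
--     return response[p:stop - 1] if stop is not None else response[p:]
-- ===== Notes on version B (the rewrite author's own statement) =====
-- stated objective: alternative
-- what changed: B never splits the text into a list of lines: it walks raw character offsets with str.find/offset-startswith to locate the diff start and the first non-diff line, and returns a single contiguous substring of the input instead of joining collected lines.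
import Mathlib
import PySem

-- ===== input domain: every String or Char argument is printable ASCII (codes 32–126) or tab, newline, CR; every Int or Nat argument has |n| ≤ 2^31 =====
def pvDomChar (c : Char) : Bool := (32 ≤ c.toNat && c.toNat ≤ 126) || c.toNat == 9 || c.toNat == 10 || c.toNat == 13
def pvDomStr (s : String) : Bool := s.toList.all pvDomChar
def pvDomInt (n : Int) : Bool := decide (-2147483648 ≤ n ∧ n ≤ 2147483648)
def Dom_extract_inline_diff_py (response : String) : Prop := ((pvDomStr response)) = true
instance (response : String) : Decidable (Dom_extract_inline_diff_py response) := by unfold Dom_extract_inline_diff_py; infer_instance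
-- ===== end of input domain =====

-- B replaces A's split-into-lines + boolean-flag loop by a raw character-offset scan of the
-- text (newline walking, in-place line-head tests, one contiguous substring); objective: alternative.

-- ===== PORT A =====

-- `line.startswith("diff --git") or line.startswith("---")`
def pvIsStart (l : String) : Bool :=
  PySem.Str.startswith l "diff --git" || PySem.Str.startswith l "---"

-- the break condition: `line and line[0] not in " +-@" and not line.startswith(...)`;
-- `line[0] in " +-@"` is char membership, the truthiness guard `line` is the [] pattern.
def pvStopLine (l : String) : Bool :=
  match l.toList with
  | [] => false
  | c :: _ =>
      !(c ∈ [' ', '+', '-', '@']) &&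
      !PySem.Str.startswith l "diff" &&
      !PySem.Str.startswith l "---" &&
      !PySem.Str.startswith l "+++" &&
      !PySem.Str.startswith l "index"

-- A's loop: state = (diff_lines accumulator, in_diff flag); `break` returns the accumulator.
def pvAloop (ls : List String) (inDiff : Bool) (acc : List String) : List String :=
  match ls with
  | [] => acc
  | l :: rest =>
      let inDiff' := if pvIsStart l then true else inDiff
      if inDiff' then
        if pvStopLine l then acc
        else pvAloop rest inDiff' (acc ++ [l])
      else pvAloop rest inDiff' acc

def extract_inline_diff_py (response : String) : Option String :=
  let lines := (PySem.Str.split? response "\n").getD []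
  let diffLines := pvAloop lines false []
  if diffLines = [] then none else some (PySem.Str.join "\n" diffLines)

-- ===== PORT B =====
-- B works on raw character offsets of `response`; the port carries the SUFFIX of the
-- character list in place of the absolute offset (response.startswith(pre, q) is
-- isPrefixOf on the suffix; response.find("\n", q) is findIdx? on the suffix, none = -1;
-- response[q] is the suffix's head) — exact, offsets and suffixes are in bijection.

-- `response.startswith("diff --git", p) or response.startswith("---", p)`
def pvIsStartC (cs : List Char) : Bool :=
  "diff --git".toList.isPrefixOf cs || "---".toList.isPrefixOf cs

-- `q < len(response) and response[q] not in " +-@\\n" and not response.startswith((…), q)`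
def pvStopC (cs : List Char) : Bool :=
  match cs with
  | [] => false
  | c :: _ =>
      !(c ∈ [' ', '+', '-', '@', '\n']) &&
      !("diff".toList.isPrefixOf cs) &&
      !("---".toList.isPrefixOf cs) &&
      !("+++".toList.isPrefixOf cs) &&
      !("index".toList.isPrefixOf cs)

-- `response.find("\\n", q)` relative to the suffix (none = -1)
def pvFindNl (cs : List Char) : Option Nat := cs.findIdx? (· == '\n')

-- phase 1: the `while not (…startswith…)` loop; returns the suffix at p (= response[p:]).
def pvGo1 (cs : List Char) : Option (List Char) :=
  if pvIsStartC cs then some cs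
  else
    match h : pvFindNl cs with
    | none => none
    | some i => pvGo1 (cs.drop (i + 1))
termination_by cs.length
decreasing_by
  have hne : cs ≠ [] := by
    intro hcs; rw [hcs] at h; simp [pvFindNl] at h
  have hpos : 0 < cs.length := List.length_pos_of_ne_nil hne
  simp [List.length_drop]
  omega

-- phase 2: the `while True` loop; q is the offset relative to p; returns `stop` (none
-- when the diff runs to the end of the text).
def pvGo2 (cs : List Char) (q : Nat) : Option Nat :=
  if pvStopC cs then some q
  else
    match h : pvFindNl cs with
    | none => none
    | some i => pvGo2 (cs.drop (i + 1)) (q + i + 1)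
termination_by cs.length
decreasing_by
  have hne : cs ≠ [] := by
    intro hcs; rw [hcs] at h; simp [pvFindNl] at h
  have hpos : 0 < cs.length := List.length_pos_of_ne_nil hne
  simp [List.length_drop]
  omega

def extract_inline_diff_py_alt (response : String) : Option String :=
  match pvGo1 response.toList with
  | none => none
  | some S =>
      match pvGo2 S 0 with
      | some q => some (String.ofList (S.take (q - 1)))
      | none => some (String.ofList S)

-- ===== PRECONDITION & SPEC =====
def Spec_extract_inline_diff_py (response : String) (out : Option String) : Prop := out = extract_inline_diff_py_alt response
instance (response : String) (out : Option String) : Decidable (Spec_extract_inline_diff_py response out) := by unfold Spec_extract_inline_diff_py; infer_instance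

-- ===== CLAIM (what is proved, stated in full; the proofs are below) =====
def Claim_equal_extract_inline_diff_py : Prop := ∀ (response : String), Dom_extract_inline_diff_py response → Spec_extract_inline_diff_py response (extract_inline_diff_py response)

-- ===== LEMMAS AND PROOFS =====

-- char-level line splitter equal to A's split("\n")
def pvLinesC : List Char → List (List Char)
  | [] => [[]]
  | c :: rest => if c = '\n' then [] :: pvLinesC rest else (pvLinesC rest).modifyHead (c :: ·)

theorem pvLinesC_ne_nil (cs : List Char) : pvLinesC cs ≠ [] := by
  induction cs with
  | nil => simp [pvLinesC]
  | cons c rest ih =>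
    simp only [pvLinesC]
    split_ifs
    · simp
    · cases h : pvLinesC rest with
      | nil => exact absurd h ih
      | cons a l => simp [List.modifyHead]

theorem pvGo_inv (fuel : Nat) (l cur : List Char) (acc : List (List Char)) (h : l.length < fuel) :
    PySem.Chars.splitOn.go ['\n'] fuel l cur acc
      = acc.reverse ++ (pvLinesC l).modifyHead (cur.reverse ++ ·) := by
  induction fuel generalizing l cur acc with
  | zero => omega
  | succ f ih =>
    cases l with
    | nil =>
      rw [PySem.Chars.splitOn.go]
      · simp [pvLinesC]
      · omega
    | cons c rest =>
      rw [PySem.Chars.splitOn.go]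
      by_cases hc : c = '\n'
      · subst hc
        have hp : List.isPrefixOf ['\n'] ('\n' :: rest) = true := by simp [List.isPrefixOf]
        simp only [hp, if_pos]
        rw [ih _ _ _ (by simpa using h)]
        simp only [pvLinesC, if_pos rfl, List.modifyHead, List.reverse_cons, List.reverse_nil,
          List.nil_append, List.append_assoc]
        cases hpl : pvLinesC rest <;> simp [hpl]
      · have hp : List.isPrefixOf ['\n'] (c :: rest) = false := by
          simp [List.isPrefixOf, Ne.symm hc]
        simp only [hp, Bool.false_eq_true, if_false]
        rw [ih _ _ _ (by simpa using h)]
        rcases hr : pvLinesC rest with _ | ⟨hd, tl⟩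
        · exact absurd hr (pvLinesC_ne_nil rest)
        · simp [pvLinesC, hc, hr, List.modifyHead]

theorem splitOn_eq (cs : List Char) : PySem.Chars.splitOn cs ['\n'] = pvLinesC cs := by
  unfold PySem.Chars.splitOn
  rw [pvGo_inv _ _ _ _ (by omega)]
  rcases h : pvLinesC cs with _ | ⟨hd, tl⟩
  · exact absurd h (pvLinesC_ne_nil cs)
  · simp [List.modifyHead]

-- line structure of cs: either no newline, or cs = t ++ '\n' :: r with newline-free t
theorem pvLines_struct (cs : List Char) :
    (pvFindNl cs = none ∧ '\n' ∉ cs ∧ pvLinesC cs = [cs]) ∨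
    (∃ t r, cs = t ++ '\n' :: r ∧ '\n' ∉ t ∧ pvFindNl cs = some t.length ∧
      pvLinesC cs = t :: pvLinesC r) := by
  induction cs with
  | nil => left; simp [pvFindNl, pvLinesC]
  | cons c rest ih =>
    by_cases hc : c = '\n'
    · subst hc
      right
      exact ⟨[], rest, by simp, by simp, by simp [pvFindNl, List.findIdx?_cons], by simp [pvLinesC]⟩
    · rcases ih with ⟨h1, h2, h3⟩ | ⟨t, r, ht, hnt, hf, hl⟩
      · left
        refine ⟨?_, by simp [h2, Ne.symm hc], by simp [pvLinesC, hc, h3, List.modifyHead]⟩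
        simp only [pvFindNl, List.findIdx?_cons, beq_iff_eq, hc, if_false]
        simp only [pvFindNl] at h1
        simp [h1]
      · right
        refine ⟨c :: t, r, by simp [ht], by simp [hnt, Ne.symm hc], ?_, ?_⟩
        · simp only [pvFindNl, List.findIdx?_cons, beq_iff_eq, hc, if_false]
          simp only [pvFindNl] at hf
          simp [hf]
        · simp [pvLinesC, hc, hl, List.modifyHead]

-- a prefix containing no newline matches (t ++ '\n' :: r) iff it matches t
theorem isPrefixOf_break (P : List Char) (hP : '\n' ∉ P) (t r : List Char) :
    P.isPrefixOf (t ++ '\n' :: r) = P.isPrefixOf t := by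
  induction P generalizing t with
  | nil => simp [List.isPrefixOf]
  | cons p P' ihp =>
    cases t with
    | nil =>
      have hp : p ≠ '\n' := by intro h; exact hP (by simp [h])
      simp [List.isPrefixOf, hp]
    | cons a t' =>
      simp only [List.cons_append, List.isPrefixOf]
      rw [ihp (fun h => hP (by simp [h]))]

-- String-level predicates on a rebuilt line coincide with the char-level ones
theorem isStart_ofList (t : List Char) : pvIsStart (String.ofList t) = pvIsStartC t := by
  simp [pvIsStart, pvIsStartC, PySem.Str.startswith_eq, PySem.Chars.startswith]

theorem stopLine_ofList (t : List Char) (ht : '\n' ∉ t) :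
    pvStopLine (String.ofList t) = pvStopC t := by
  cases t with
  | nil => simp [pvStopLine, pvStopC]
  | cons c t' =>
    have hc : c ≠ '\n' := by intro h; exact ht (by simp [h])
    simp [pvStopLine, pvStopC, PySem.Str.startswith_eq, PySem.Chars.startswith, hc]

-- the char-level predicates read only the first line
theorem isStartC_break (t r : List Char) :
    pvIsStartC (t ++ '\n' :: r) = pvIsStartC t := by
  simp only [pvIsStartC]
  rw [isPrefixOf_break "diff --git".toList (by decide) t r,
      isPrefixOf_break "---".toList (by decide) t r]

theorem stopC_break (t r : List Char) (ht : '\n' ∉ t) :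
    pvStopC (t ++ '\n' :: r) = pvStopC t := by
  cases t with
  | nil => simp [pvStopC]
  | cons c t' =>
    simp only [List.cons_append, pvStopC]
    rw [show c :: (t' ++ '\n' :: r) = (c :: t') ++ '\n' :: r from rfl]
    rw [isPrefixOf_break "diff".toList (by decide) (c :: t') r,
        isPrefixOf_break "---".toList (by decide) (c :: t') r,
        isPrefixOf_break "+++".toList (by decide) (c :: t') r,
        isPrefixOf_break "index".toList (by decide) (c :: t') r]

theorem join_modifyHead_cons (c : Char) (hd : List Char) (tl : List (List Char)) :
    PySem.Chars.join ['\n'] ((hd :: tl).modifyHead (c :: ·)) = c :: PySem.Chars.join ['\n'] (hd :: tl) := by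
  cases tl with
  | nil => simp [List.modifyHead, PySem.Chars.join_singleton]
  | cons q tl' => simp [List.modifyHead, PySem.Chars.join_cons_cons]

-- joining the lines back gives the text
theorem join_pvLinesC (cs : List Char) : PySem.Chars.join ['\n'] (pvLinesC cs) = cs := by
  induction cs with
  | nil => simp [pvLinesC, PySem.Chars.join_singleton]
  | cons c rest ih =>
    by_cases hc : c = '\n'
    · subst hc
      rcases h : pvLinesC rest with _ | ⟨hd, tl⟩
      · exact absurd h (pvLinesC_ne_nil rest)
      · rw [h] at ih
        simp [pvLinesC, h, PySem.Chars.join_cons_cons, ih]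
    · rcases h : pvLinesC rest with _ | ⟨hd, tl⟩
      · exact absurd h (pvLinesC_ne_nil rest)
      · rw [h] at ih
        simp only [pvLinesC, hc, if_false, h]
        rw [join_modifyHead_cons, ih]

-- pvLinesC of a newline-free text, and pushed through one separator
theorem pvLinesC_no_nl (t : List Char) (ht : '\n' ∉ t) : pvLinesC t = [t] := by
  rcases pvLines_struct t with ⟨_, _, h⟩ | ⟨a, b, hab, _, _, _⟩
  · exact h
  · exact absurd (hab ▸ (by simp : '\n' ∈ a ++ '\n' :: b)) ht

theorem pvLinesC_break (t r : List Char) (ht : '\n' ∉ t) :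
    pvLinesC (t ++ '\n' :: r) = t :: pvLinesC r := by
  induction t with
  | nil => simp [pvLinesC]
  | cons c t' ih =>
    have hc : c ≠ '\n' := by intro h; exact ht (by simp [h])
    simp only [List.cons_append, pvLinesC, hc, if_false]
    rw [ih (fun h => ht (by simp [h]))]
    simp [List.modifyHead]

theorem drop_break (t r : List Char) : (t ++ '\n' :: r).drop (t.length + 1) = r := by
  rw [show t ++ '\n' :: r = (t ++ ['\n']) ++ r by simp]
  rw [show t.length + 1 = (t ++ ['\n']).length by simp]
  exact List.drop_left

-- phase 1 computes findIdx? over the lines, returning the joined tail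
theorem go1_eq (cs : List Char) :
    pvGo1 cs = ((pvLinesC cs).findIdx? pvIsStartC).map
      (fun i => PySem.Chars.join ['\n'] ((pvLinesC cs).drop i)) := by
  rw [pvGo1]
  rcases pvLines_struct cs with ⟨h1, h2, h3⟩ | ⟨t, r, ht, hnt, hf, hl⟩
  · by_cases hs : pvIsStartC cs
    · simp [hs, h3, List.findIdx?_cons, PySem.Chars.join_singleton]
    · simp only [hs, Bool.false_eq_true, if_false, h3, List.findIdx?_cons,
        Bool.not_eq_true _ ▸ (by simpa using hs : ¬pvIsStartC cs = true)]
      split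
      · simp [h3, List.findIdx?_cons, Bool.not_eq_true _ ▸ hs]
      · rename_i i heq; rw [h1] at heq; exact absurd heq (by simp)
  · have hdrop : cs.drop (t.length + 1) = r := ht ▸ drop_break t r
    by_cases hs : pvIsStartC cs
    · have hst : pvIsStartC t = true := by rw [← isStartC_break t r, ← ht]; exact hs
      simp only [hs, if_pos, hl, List.findIdx?_cons, hst, if_true, Option.map_some,
        List.drop_zero]
      rw [← hl, join_pvLinesC]
    · have hst : pvIsStartC t = false := by
        rw [← isStartC_break t r, ← ht]; exact Bool.not_eq_true _ ▸ (by simpa using hs)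
      have ih := go1_eq r
      simp only [hs, Bool.false_eq_true, if_false]
      split
      · rename_i heq; rw [hf] at heq; exact absurd heq (by simp)
      · rename_i i heq
        rw [hf] at heq
        injection heq with heq'
        subst heq'
        rw [hdrop, ih, hl, List.findIdx?_cons, hst]
        simp only [Bool.false_eq_true, if_false, Option.map_map]
        cases (pvLinesC r).findIdx? pvIsStartC <;> simp
termination_by cs.length
decreasing_by
  have : cs.length = t.length + 1 + r.length := by rw [ht]; simp; omega
  omega

theorem go2_shift (cs : List Char) (q : Nat) : pvGo2 cs q = (pvGo2 cs 0).map (q + ·) := by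
  conv_lhs => rw [pvGo2]
  conv_rhs => rw [pvGo2]
  by_cases hstop : pvStopC cs
  · simp [hstop]
  · simp only [hstop, Bool.false_eq_true, if_false]
    split
    · rfl
    · rename_i i h1
      have hne : cs ≠ [] := by
        intro hcs; rw [hcs] at h1; simp [pvFindNl] at h1
      have hpos : 0 < cs.length := List.length_pos_of_ne_nil hne
      rw [go2_shift (cs.drop (i+1)) (q + i + 1), go2_shift (cs.drop (i+1)) (0 + i + 1),
        Option.map_map]
      cases pvGo2 (cs.drop (i+1)) 0 <;> simp [Nat.add_assoc]
termination_by cs.length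
decreasing_by
  all_goals simp [List.length_drop]; omega

theorem go2_none_stop (cs : List Char) (h : pvGo2 cs 0 = none) : pvStopC cs = false := by
  rw [pvGo2] at h
  by_cases hs : pvStopC cs
  · simp [hs] at h
  · simpa using hs

theorem go2_zero_stop (cs : List Char) (h : pvGo2 cs 0 = some 0) : pvStopC cs = true := by
  rw [pvGo2] at h
  by_cases hs : pvStopC cs
  · exact hs
  · simp only [hs, Bool.false_eq_true, if_false] at h
    exfalso
    split at h
    · exact absurd h (by simp)
    · rename_i i h1
      rw [go2_shift] at h
      cases hg : pvGo2 (cs.drop (i+1)) 0 <;> rw [hg] at h <;> simp at h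

theorem go2_stop (cs : List Char) (h : pvStopC cs = true) : pvGo2 cs 0 = some 0 := by
  rw [pvGo2]; simp [h]

-- the first line's stop flag is the whole text's
theorem stopC_head (cs : List Char) :
    ∃ h tl, pvLinesC cs = h :: tl ∧ pvStopC h = pvStopC cs := by
  rcases pvLines_struct cs with ⟨_, _, h3⟩ | ⟨t, r, ht, hnt, _, hl⟩
  · exact ⟨cs, [], h3, rfl⟩
  · exact ⟨t, pvLinesC r, hl, by rw [ht, stopC_break t r hnt]⟩

theorem go2_eq (cs : List Char) :
    PySem.Chars.join ['\n'] ((pvLinesC cs).takeWhile (fun t => !pvStopC t)) =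
      (match pvGo2 cs 0 with
       | none => cs
       | some q => cs.take (q - 1)) := by
  rw [pvGo2]
  by_cases hstop : pvStopC cs
  · obtain ⟨h, tl, hl, hh⟩ := stopC_head cs
    rw [hl, List.takeWhile_cons, hh, hstop]
    simp [hstop, PySem.Chars.join_nil]
  · simp only [hstop, Bool.false_eq_true, if_false]
    split
    · rename_i heq
      rcases pvLines_struct cs with ⟨h1, h2, h3⟩ | ⟨t, r, ht, hnt, hf', hl⟩
      · rw [h3, List.takeWhile_cons]
        simp [Bool.not_eq_true _ ▸ hstop, PySem.Chars.join_singleton]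
      · rw [hf'] at heq
        simp only [] at heq
        have hdrop : cs.drop (t.length + 1) = r := ht ▸ drop_break t r
        rw [hdrop, go2_shift] at heq
        have hg : pvGo2 r 0 = none := by
          cases hg' : pvGo2 r 0
          · rfl
          · rw [hg'] at heq; exact absurd heq (by simp)
        have hst : pvStopC t = false := by
          rw [← stopC_break t r hnt, ← ht]; simpa using hstop
        have ih := go2_eq r
        rw [hg] at ih
        have hstopr : pvStopC r = false := go2_none_stop r hg
        obtain ⟨h, tl, hlr, hh⟩ := stopC_head r
        rw [hlr, List.takeWhile_cons, hh, hstopr] at ih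
        simp only [Bool.not_false, if_pos] at ih
        rw [hl, List.takeWhile_cons, hst]
        simp only [Bool.not_false, if_pos]
        rw [hlr, List.takeWhile_cons, hh, hstopr]
        simp only [Bool.not_false, if_pos]
        rw [PySem.Chars.join_cons_cons, ih, ht]
        simp
    · rename_i q heq
      rcases pvLines_struct cs with ⟨h1, h2, h3⟩ | ⟨t, r, ht, hnt, hf', hl⟩
      · rw [h1] at heq; exact absurd heq (by simp)
      · rw [hf'] at heq
        simp only [] at heq
        have hdrop : cs.drop (t.length + 1) = r := ht ▸ drop_break t r
        rw [hdrop, go2_shift] at heq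
        have hst : pvStopC t = false := by
          rw [← stopC_break t r hnt, ← ht]; simpa using hstop
        have ih := go2_eq r
        cases hg : pvGo2 r 0 with
        | none => rw [hg] at heq; exact absurd heq (by simp)
        | some q' =>
          rw [hg] at heq ih
          simp only [Option.map_some, Option.some.injEq] at heq
          subst heq
          rw [hl, List.takeWhile_cons, hst]
          simp only [Bool.not_false, if_pos]
          cases q' with
          | zero =>
            have hstopr : pvStopC r = true := go2_zero_stop r hg
            obtain ⟨h, tl, hlr, hh⟩ := stopC_head r
            rw [hlr, List.takeWhile_cons, hh, hstopr]
            simp only [Bool.not_true, Bool.false_eq_true, if_false]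
            rw [PySem.Chars.join_singleton, ht]
            rw [show (0:Nat) + t.length + 1 + 0 - 1 = t.length by omega]
            exact (List.take_left).symm
          | succ k =>
            have hstopr : pvStopC r = false := by
              by_contra hcon
              have h0 := go2_stop r (by simpa using hcon)
              rw [hg] at h0; injection h0 with h0'; omega
            obtain ⟨h, tl, hlr, hh⟩ := stopC_head r
            rw [hlr, List.takeWhile_cons, hh, hstopr] at ih ⊢
            simp only [Bool.not_false, if_pos] at ih ⊢
            rw [PySem.Chars.join_cons_cons, ih, ht]
            have e1 : (0:Nat) + t.length + 1 + (k + 1) - 1 = t.length + 1 + k := by omega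
            rw [e1, show t ++ '\n' :: r = (t ++ ['\n']) ++ r by simp, List.take_append]
            have e2 : (t ++ ['\n']).length ≤ t.length + 1 + k := by simp
            rw [List.take_of_length_le e2]
            simp [Nat.add_sub_cancel_left]
termination_by cs.length
decreasing_by
  all_goals
    have hlen : cs.length = t.length + 1 + r.length := by rw [ht]; simp; omega
    omega

-- A's collect phase once in_diff is set, and its two-phase line-level form
def pvBcollect (ls : List String) (acc : List String) : List String :=
  match ls with
  | [] => acc
  | l :: rest => if pvStopLine l then acc else pvBcollect rest (acc ++ [l])

theorem stop_of_start (l : String) (h : pvIsStart l = true) : pvStopLine l = false := by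
  unfold pvIsStart at h
  unfold pvStopLine
  cases hl : l.toList with
  | nil => rfl
  | cons c cs =>
    rcases Bool.or_eq_true_iff.mp h with h1 | h1
    · have h2 : PySem.Str.startswith l "diff" = true := by
        rw [PySem.Str.startswith_eq, PySem.Chars.startswith_iff] at h1 ⊢
        exact List.IsPrefix.trans (by decide) h1
      simp [PySem.Str.startswith_eq] at h2
      simp [PySem.Str.startswith_eq, h2]
    · simp [PySem.Str.startswith_eq] at h1
      simp [PySem.Str.startswith_eq, h1]

theorem aloop_true_eq_bcollect (ls acc : List String) : pvAloop ls true acc = pvBcollect ls acc := by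
  induction ls generalizing acc with
  | nil => rfl
  | cons l rest ih =>
    unfold pvAloop pvBcollect
    simp only [if_pos, ite_self]
    by_cases hs : pvStopLine l
    · simp [hs]
    · simp [hs, ih]

theorem bcollect_ne_nil (ls acc : List String) (h : acc ≠ []) : pvBcollect ls acc ≠ [] := by
  induction ls generalizing acc with
  | nil => simpa [pvBcollect]
  | cons x rest ih =>
    unfold pvBcollect
    by_cases hs : pvStopLine x
    · simpa [hs]
    · simp only [hs, Bool.false_eq_true, if_false]
      exact ih _ (by simp)

theorem aloop_two_phase (ls : List String) :
    (if pvAloop ls false [] = [] then (none : Option String)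
     else some (PySem.Str.join "\n" (pvAloop ls false []))) =
    (match ls.findIdx? pvIsStart with
     | none => none
     | some i => some (PySem.Str.join "\n" (pvBcollect (ls.drop i) []))) := by
  induction ls with
  | nil => rfl
  | cons l rest ih =>
    cases hIs : pvIsStart l with
    | true =>
      have hstop := stop_of_start l hIs
      have hA : pvAloop (l :: rest) false [] = pvBcollect rest [l] := by
        conv_lhs => rw [pvAloop.eq_def]
        simp [hIs, hstop, aloop_true_eq_bcollect]
      have hB : pvBcollect (l :: rest) [] = pvBcollect rest [l] := by
        conv_lhs => rw [pvBcollect.eq_def]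
        simp [hstop]
      rw [List.findIdx?_cons]
      simp [hIs, hA, hB, bcollect_ne_nil rest [l] (by simp)]
    | false =>
      have hA : pvAloop (l :: rest) false [] = pvAloop rest false [] := by
        conv_lhs => rw [pvAloop.eq_def]
        simp [hIs]
      rw [List.findIdx?_cons, hA]
      simp only [hIs, Bool.false_eq_true, if_false]
      cases hf : rest.findIdx? pvIsStart with
      | none => simpa [hf] using ih
      | some i => simpa [hf, List.drop_succ_cons] using ih

-- remaining glue lemmas
theorem pvLinesC_no_nl_mem (cs : List Char) : ∀ t ∈ pvLinesC cs, '\n' ∉ t := by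
  intro t htmem
  rcases pvLines_struct cs with ⟨_, h2, h3⟩ | ⟨a, r, ha, hna, _, hl⟩
  · rw [h3] at htmem; simp at htmem; subst htmem; exact h2
  · rw [hl] at htmem
    rcases List.mem_cons.mp htmem with h | h
    · subst h; exact hna
    · exact pvLinesC_no_nl_mem r t h
termination_by cs.length
decreasing_by
  have : cs.length = a.length + 1 + r.length := by rw [ha]; simp; omega
  omega

theorem takeWhile_congr' {α : Type} (p q : α → Bool) (l : List α) (h : ∀ x ∈ l, p x = q x) :
    l.takeWhile p = l.takeWhile q := by
  induction l with
  | nil => rfl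
  | cons x xs ih =>
    rw [List.takeWhile_cons, List.takeWhile_cons, h x (by simp)]
    split
    · rw [ih (fun y hy => h y (by simp [hy]))]
    · rfl

theorem bcollect_eq_takeWhile (ls acc : List String) :
    pvBcollect ls acc = acc ++ ls.takeWhile (fun l => !pvStopLine l) := by
  induction ls generalizing acc with
  | nil => simp [pvBcollect]
  | cons l rest ih =>
    rw [pvBcollect, List.takeWhile_cons]
    by_cases hs : pvStopLine l
    · simp [hs]
    · simp [hs, ih]

theorem pvLinesC_join (h : List Char) (tl : List (List Char))
    (hnl : ∀ t ∈ h :: tl, '\n' ∉ t) :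
    pvLinesC (PySem.Chars.join ['\n'] (h :: tl)) = h :: tl := by
  cases tl with
  | nil =>
    rw [PySem.Chars.join_singleton]
    exact pvLinesC_no_nl h (hnl h (by simp))
  | cons q tl' =>
    rw [PySem.Chars.join_cons_cons]
    rw [show h ++ ['\n'] ++ PySem.Chars.join ['\n'] (q :: tl')
        = h ++ '\n' :: PySem.Chars.join ['\n'] (q :: tl') by simp]
    rw [pvLinesC_break _ _ (hnl h (by simp))]
    rw [pvLinesC_join q tl' (fun t ht => hnl t (by simp [ht]))]

theorem drop_ne_nil_of_findIdx? {α : Type} (p : α → Bool) (l : List α) (i : Nat)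
    (h : l.findIdx? p = some i) : ∃ x xs, l.drop i = x :: xs := by
  induction l generalizing i with
  | nil => simp at h
  | cons a as ih =>
    rw [List.findIdx?_cons] at h
    split at h
    · injection h with h'; subst h'; exact ⟨a, as, rfl⟩
    · cases hf : as.findIdx? p with
      | none => rw [hf] at h; exact absurd h (by simp)
      | some j =>
        rw [hf] at h; simp only [Option.map_some, Option.some.injEq] at h
        subst h
        simpa using ih j hf

theorem final_eq (response : String) :
    extract_inline_diff_py response = extract_inline_diff_py_alt response := by
  have hnl : ("\n" : String).toList = ['\n'] := rfl
  have hsplit : (PySem.Str.split? response "\n").getD []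
      = (pvLinesC response.toList).map String.ofList := by
    simp only [PySem.Str.split?, hnl, PySem.Chars.split?, List.isEmpty_cons,
      Bool.false_eq_true, if_false, Option.map_some, Option.getD_some]
    rw [splitOn_eq]
  simp only [extract_inline_diff_py, extract_inline_diff_py_alt]
  rw [hsplit, aloop_two_phase, List.findIdx?_map,
    show (pvIsStart ∘ String.ofList) = pvIsStartC from funext isStart_ofList, go1_eq]
  cases hidx : (pvLinesC response.toList).findIdx? pvIsStartC with
  | none => rfl
  | some i =>
    simp only [Option.map_some]
    set cs := response.toList with hcs
    set L := pvLinesC cs with hL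
    have hmem : ∀ t ∈ L.drop i, '\n' ∉ t :=
      fun t ht => pvLinesC_no_nl_mem cs t (List.mem_of_mem_drop ht)
    obtain ⟨h0, tl0, hS⟩ := drop_ne_nil_of_findIdx? pvIsStartC L i hidx
    have hLS : pvLinesC (PySem.Chars.join ['\n'] (L.drop i)) = L.drop i := by
      rw [hS] at hmem ⊢
      exact pvLinesC_join h0 tl0 hmem
    have h2 := go2_eq (PySem.Chars.join ['\n'] (L.drop i))
    rw [hLS] at h2
    have hAtw : pvBcollect ((L.map String.ofList).drop i) []
        = ((L.drop i).takeWhile (fun t => !pvStopC t)).map String.ofList := by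
      rw [← List.map_drop, bcollect_eq_takeWhile, List.nil_append, List.takeWhile_map]
      congr 1
      exact takeWhile_congr' _ _ _
        (fun t ht => by
          simp only [Function.comp_apply]
          rw [stopLine_ofList t (hmem t ht)])
    rw [hAtw]
    cases hg : pvGo2 (PySem.Chars.join ['\n'] (L.drop i)) 0 with
    | none =>
      rw [hg] at h2
      apply congrArg some
      apply String.toList_inj.mp
      rw [PySem.Str.toList_join, String.toList_ofList, List.map_map,
        show (String.toList ∘ String.ofList) = id from funext (fun l => String.toList_ofList),
        List.map_id]
      simp only [String.toList_ofList]
      exact h2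
    | some q =>
      rw [hg] at h2
      apply congrArg some
      apply String.toList_inj.mp
      rw [PySem.Str.toList_join, String.toList_ofList, List.map_map,
        show (String.toList ∘ String.ofList) = id from funext (fun l => String.toList_ofList),
        List.map_id]
      simp only [String.toList_ofList]
      exact h2

-- ===== VERDICT (by name: the statement is the Claim_ definition above) =====
theorem extract_inline_diff_py_spec : Claim_equal_extract_inline_diff_py := by
  intro response _
  unfold Spec_extract_inline_diff_py
  exact final_eq response
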